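-- pv_equiv track=rewrite | github.com/ultimate-pa/ultimate | releaseScripts/benchmark-processing/get-benchexec-overview.py | split_number_and_unit
-- ===== SOURCE A (Python) =====
-- from typing import (
--     Tuple,
--     List,
--     Iterator,
--     Any,
--     Dict,
--     Optional,
--     Pattern,
--     ChainMap,
--     TypeVar,
-- )
--
-- def split_number_and_unit(s: str) -> Tuple[str, str]:
--     if not s:
--         raise ValueError("empty value")
--     s = s.strip()
--     pos = len(s)
--     while pos and not s[pos - 1].isdigit():
--         pos -= 1
--     number = s[:pos]
--     unit = s[pos:].strip()
--     return number, unit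
-- ===== SOURCE B (Python) =====
-- def split_number_and_unit(s: str):
--     if not s:
--         raise ValueError("empty value")
--     s = s.strip()
--     idxs = [i for i in range(len(s)) if s[i].isdigit()]
--     pos = idxs[-1] + 1 if idxs else 0
--     return s[:pos], s[pos:].strip()
-- ===== Notes on version B (the rewrite author's own statement) =====
-- stated objective: alternative
-- what changed: replaces the early-stopping backward while-loop over a mutable pos with a forward index-table pass (all digit positions collected, pos = last digit index + 1, then two slices)
import Mathlib
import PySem

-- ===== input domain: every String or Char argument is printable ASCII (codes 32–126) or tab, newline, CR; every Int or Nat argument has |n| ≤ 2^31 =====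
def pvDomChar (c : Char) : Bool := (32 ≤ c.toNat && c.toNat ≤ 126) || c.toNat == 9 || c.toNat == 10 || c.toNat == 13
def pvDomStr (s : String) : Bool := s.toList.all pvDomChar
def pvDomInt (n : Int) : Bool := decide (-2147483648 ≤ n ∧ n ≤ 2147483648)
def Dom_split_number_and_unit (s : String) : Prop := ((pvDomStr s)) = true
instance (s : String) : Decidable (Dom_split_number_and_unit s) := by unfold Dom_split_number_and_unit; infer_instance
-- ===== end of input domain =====

-- B replaces A's backward early-stopping while-loop with a forward digit-index table and two slices (alternative decomposition, same cost).

-- ===== PORT A =====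
-- the while loop: while pos and not s[pos-1].isdigit(): pos -= 1   (pos starts at len(s); index pos-1 is always in range, so getD's default is never read)
def pvLoopA (t : List Char) : Nat → Nat
  | 0 => 0
  | p + 1 => if PySem.Chars.isdigit (t.getD p ' ') then p + 1 else pvLoopA t p

def split_number_and_unit (s : String) : String × String :=
  let t := PySem.Chars.strip s.toList
  let pos := pvLoopA t t.length
  (String.ofList (t.take pos), String.ofList (PySem.Chars.strip (t.drop pos)))

-- ===== PORT B =====
def split_number_and_unit_alt (s : String) : String × String :=
  let t := PySem.Chars.strip s.toList
  -- idxs = [i for i in range(len(s)) if s[i].isdigit()]   (i < len(s), so getD's default is never read)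
  let idxs := (List.range t.length).filter (fun i => PySem.Chars.isdigit (t.getD i ' '))
  let pos := match idxs.getLast? with | some i => i + 1 | none => 0
  (String.ofList (t.take pos), String.ofList (PySem.Chars.strip (t.drop pos)))

-- ===== PRECONDITION & SPEC =====
-- Pre_ excludes only the empty string, on which the Python A raises ValueError.
def Pre_split_number_and_unit (s : String) : Prop := s ≠ ""
instance (s : String) : Decidable (Pre_split_number_and_unit s) := by unfold Pre_split_number_and_unit; infer_instance
def pvWitness_split_number_and_unit : String := "12 ms"

def Spec_split_number_and_unit (s : String) (out : String × String) : Prop := out = split_number_and_unit_alt s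
instance (s : String) (out : String × String) : Decidable (Spec_split_number_and_unit s out) := by unfold Spec_split_number_and_unit; infer_instance

-- ===== CLAIM (what is proved, stated in full; the proofs are below) =====
def Claim_equal_split_number_and_unit : Prop := ∀ (s : String), Dom_split_number_and_unit s → Pre_split_number_and_unit s → Spec_split_number_and_unit s (split_number_and_unit s)

-- ===== LEMMAS AND PROOFS =====
-- A's backward scan stops exactly one past the last digit index of t.take p.
theorem pvLoopA_eq (t : List Char) (p : Nat) :
    pvLoopA t p = (match ((List.range p).filter (fun i => PySem.Chars.isdigit (t.getD i ' '))).getLast? with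
      | some i => i + 1 | none => 0) := by
  induction p with
  | zero => simp [pvLoopA]
  | succ p ih =>
      rw [List.range_succ, List.filter_append, pvLoopA]
      by_cases h : PySem.Chars.isdigit (t.getD p ' ')
      · rw [if_pos h]
        simp only [List.filter_cons, List.filter_nil, h, if_true, List.getLast?_concat]
      · rw [if_neg h, ih]
        simp only [List.getD] at h
        simp [h]

-- ===== VERDICT (by name: the statement is the Claim_ definition above) =====
theorem split_number_and_unit_spec : Claim_equal_split_number_and_unit := by
  intro s _ _
  unfold Spec_split_number_and_unit split_number_and_unit split_number_and_unit_alt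
  simp only [pvLoopA_eq]
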